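-- pv_equiv track=rewrite | github.com/lzzcd001/OSLSM | OSLSM/code/ss_settings.py | get_cats
-- ===== SOURCE A (Python) =====
-- PASCAL_CATS = ['aeroplane', 'bicycle', 'bird', 'boat', 'bottle', 'bus', 'car' , 'cat', 'chair', 'cow',
--                'diningtable', 'dog', 'horse', 'motorbike', 'person', 'potted plant', 'sheep', 'sofa',
--                'train', 'tv/monitor']
--
-- def get_cats(split, fold, num_folds=4):
--     '''
--       Returns a list of categories (for training/test) for a given fold number
--
--       Inputs:
--         split: specify train/val
--         fold : fold number, out of num_folds
--         num_folds: Split the set of image classes to how many folds. In BMVC paper, we use 4 folds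
--
--     '''
--     num_cats = len(PASCAL_CATS)
--     assert(num_cats%num_folds==0)
--     val_size = int(num_cats/num_folds)
--     assert(fold<num_folds)
--     val_set = [ fold*val_size+v for v in range(val_size)]
--     train_set = [x for x in range(num_cats) if x not in val_set]
--     if split=='train':
--         return [PASCAL_CATS[x] for x in train_set]
--     else:
--         return [PASCAL_CATS[x] for x in val_set]
-- ===== SOURCE B (Python) =====
-- PASCAL_CATS = ['aeroplane', 'bicycle', 'bird', 'boat', 'bottle', 'bus', 'car' , 'cat', 'chair', 'cow',
--                'diningtable', 'dog', 'horse', 'motorbike', 'person', 'potted plant', 'sheep', 'sofa',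
--                'train', 'tv/monitor']
--
-- def get_cats(split, fold, num_folds=4):
--     '''Returns a list of categories (for training/test) for a given fold number, by slicing.'''
--     num_cats = len(PASCAL_CATS)
--     assert(num_cats % num_folds == 0)
--     val_size = int(num_cats / num_folds)
--     assert(fold < num_folds)
--     start = fold * val_size
--     end = start + val_size
--     if split == 'train':
--         return PASCAL_CATS[:start] + PASCAL_CATS[end:]
--     else:
--         return PASCAL_CATS[start:end]
-- ===== Notes on version B (the rewrite author's own statement) =====
-- stated objective: simpler
-- what changed: Replaces the index-set construction (range comprehension for val indices, a quadratic 'x not in val_set' filter for train indices, then indexed gathers) with two direct list slices of PASCAL_CATS.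
-- outside the precondition, e.g. on get_cats('val', -1, 4): A returns ['potted plant', 'sheep', 'sofa', 'train', 'tv/monitor'], B returns []
import Mathlib
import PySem

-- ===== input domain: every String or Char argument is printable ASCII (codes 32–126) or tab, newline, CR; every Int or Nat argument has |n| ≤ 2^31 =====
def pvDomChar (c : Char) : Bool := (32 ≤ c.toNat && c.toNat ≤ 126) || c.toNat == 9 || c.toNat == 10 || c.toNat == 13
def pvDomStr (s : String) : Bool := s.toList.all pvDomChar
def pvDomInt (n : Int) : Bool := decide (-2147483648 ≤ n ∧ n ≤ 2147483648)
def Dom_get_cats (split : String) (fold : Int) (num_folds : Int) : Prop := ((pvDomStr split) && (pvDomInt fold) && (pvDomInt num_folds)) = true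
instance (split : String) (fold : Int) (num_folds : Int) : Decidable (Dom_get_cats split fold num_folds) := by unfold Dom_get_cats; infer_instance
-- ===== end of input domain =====

-- B replaces A's index-set building (range comprehension + 'not in' filter + indexed gathers)
-- with two direct list slices; objective: simpler.

def pascalCats : List String :=
  ["aeroplane", "bicycle", "bird", "boat", "bottle", "bus", "car", "cat", "chair", "cow",
   "diningtable", "dog", "horse", "motorbike", "person", "potted plant", "sheep", "sofa",
   "train", "tv/monitor"]

-- ===== PORT A =====
def get_cats (split : String) (fold : Int) (num_folds : Int) : List String :=
  let num_cats : Int := (pascalCats.length : Int)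
  -- assert num_cats % num_folds == 0 and assert fold < num_folds: raising inputs are outside Pre_
  -- int(num_cats/num_folds): exact division under Pre_, so it equals floor division
  let val_size : Int := PySem.Int.floordiv num_cats num_folds
  let val_set : List Int := (PySem.List.pyRange 0 val_size 1).map (fun v => fold * val_size + v)
  let train_set : List Int := (PySem.List.pyRange 0 num_cats 1).filter (fun x => !(val_set.contains x))
  if split == "train" then
    train_set.map (fun x => PySem.List.pyGetD pascalCats x "")
  else
    val_set.map (fun x => PySem.List.pyGetD pascalCats x "")

-- ===== PORT B =====
def get_cats_alt (split : String) (fold : Int) (num_folds : Int) : List String :=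
  let num_cats : Int := (pascalCats.length : Int)
  let val_size : Int := PySem.Int.floordiv num_cats num_folds
  let start : Int := fold * val_size
  let stop : Int := start + val_size
  if split == "train" then
    PySem.List.slice pascalCats none (some start) ++ PySem.List.slice pascalCats (some stop) none
  else
    PySem.List.slice pascalCats (some start) (some stop)

-- ===== PRECONDITION & SPEC =====
-- Pre_ restricts to the natural domain of a fold selector: num_folds a positive divisor of the
-- category count and 0 ≤ fold < num_folds. It excludes num_folds = 0 (A raises ZeroDivisionError),
-- non-divisor num_folds and fold ≥ num_folds (A's asserts raise), and negative fold / negative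
-- num_folds, malformed inputs on which A's returned values are artefacts of Python negative-index
-- wraparound and of an empty range().
def Pre_get_cats (split : String) (fold : Int) (num_folds : Int) : Prop :=
  0 < num_folds ∧ 0 ≤ fold ∧ fold < num_folds ∧ PySem.Int.mod 20 num_folds = 0
instance (split : String) (fold : Int) (num_folds : Int) : Decidable (Pre_get_cats split fold num_folds) := by unfold Pre_get_cats; infer_instance
def pvWitness_get_cats : String × Int × Int := ("train", 1, 4)

def Spec_get_cats (split : String) (fold : Int) (num_folds : Int) (out : List String) : Prop := out = get_cats_alt split fold num_folds
instance (split : String) (fold : Int) (num_folds : Int) (out : List String) : Decidable (Spec_get_cats split fold num_folds out) := by unfold Spec_get_cats; infer_instance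

-- ===== CLAIM (what is proved, stated in full; the proofs are below) =====
def Claim_equal_get_cats : Prop := ∀ (split : String) (fold : Int) (num_folds : Int), Dom_get_cats split fold num_folds → Pre_get_cats split fold num_folds → Spec_get_cats split fold num_folds (get_cats split fold num_folds)

-- ===== LEMMAS AND PROOFS =====

-- On the (finitely many) inputs admitted by Pre_, both ports compute equal concrete lists.
lemma get_cats_eq_alt (split : String) (fold num_folds : Int)
    (h1 : 0 < num_folds) (h2 : 0 ≤ fold) (h3 : fold < num_folds)
    (h4 : PySem.Int.mod 20 num_folds = 0) :
    get_cats split fold num_folds = get_cats_alt split fold num_folds := by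
  have hdvd : num_folds ∣ 20 := (PySem.Int.mod_eq_zero_iff_dvd 20 num_folds).mp h4
  have hle : num_folds ≤ 20 := Int.le_of_dvd (by norm_num) hdvd
  interval_cases num_folds <;>
    first
      | (exfalso; revert h4; decide)
      | (interval_cases fold <;>
          (unfold get_cats get_cats_alt; split <;> decide))

-- ===== VERDICT (by name: the statement is the Claim_ definition above) =====
theorem get_cats_spec : Claim_equal_get_cats := by
  intro split fold num_folds _ ⟨h1, h2, h3, h4⟩
  exact get_cats_eq_alt split fold num_folds h1 h2 h3 h4
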